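-- pv_equiv track=rewrite | github.com/plan-x64/advent-of-code | 2022/day23.py | min_grid
-- ===== SOURCE A (Python) =====
-- def min_grid(positions):
--     xs = [x for x, _ in positions]
--     ys = [y for _, y in positions]
--     x_min, x_max = min(xs), max(xs)
--     y_min, y_max = min(ys), max(ys)
--     grid = [['.'] * (x_max - x_min + 1) for _ in range(y_max - y_min + 1)]
--
--     for x, y in positions:
--         x_rel, y_rel = (x - x_min), (y - y_min)
--         grid[y_rel][x_rel] = '#'
--     return grid
-- ===== SOURCE B (Python) =====
-- def min_grid(positions):
--     pts = set(positions)
--     x_min = min(x for x, _ in positions)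
--     x_max = max(x for x, _ in positions)
--     y_min = min(y for _, y in positions)
--     y_max = max(y for _, y in positions)
--     return [['#' if (x, y) in pts else '.' for x in range(x_min, x_max + 1)]
--             for y in range(y_min, y_max + 1)]
-- ===== Notes on version B (the rewrite author's own statement) =====
-- stated objective: idiomatic
-- what changed: B inverts the traversal: instead of allocating a '.'-filled grid and overwriting cells position by position, it builds the grid in one nested comprehension over all cells (y over rows, x over columns), testing membership of each (x, y) in a set of the positions.
import Mathlib
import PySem

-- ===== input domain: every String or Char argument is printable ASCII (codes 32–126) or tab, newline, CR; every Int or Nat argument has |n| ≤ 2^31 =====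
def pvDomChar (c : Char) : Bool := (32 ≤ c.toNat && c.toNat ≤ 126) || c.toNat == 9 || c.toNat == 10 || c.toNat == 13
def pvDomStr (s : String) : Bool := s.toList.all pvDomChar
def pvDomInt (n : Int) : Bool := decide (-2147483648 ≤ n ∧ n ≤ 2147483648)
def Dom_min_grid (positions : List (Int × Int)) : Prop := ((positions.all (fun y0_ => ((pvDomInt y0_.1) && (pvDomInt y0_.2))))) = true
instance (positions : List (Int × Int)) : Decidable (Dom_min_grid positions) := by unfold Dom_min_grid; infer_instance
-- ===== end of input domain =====

-- B builds the grid cell by cell with a membership test instead of overwriting a '.'-filled grid (idiomatic).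

-- ===== PORT A =====
-- A fills a '.'-grid, then overwrites grid[y-y_min][x-x_min] with '#' for each position.
-- The indices y - y_min and x - x_min are nonnegative for every element (min), so .toNat is exact here.
def min_grid (positions : List (Int × Int)) : List (List String) :=
  let xs := positions.map (fun p => p.1)
  let ys := positions.map (fun p => p.2)
  match PySem.List.min? xs (fun v => v), PySem.List.max? xs (fun v => v),
        PySem.List.min? ys (fun v => v), PySem.List.max? ys (fun v => v) with
  | some xmin, some xmax, some ymin, some ymax =>
    let grid := (List.range (ymax - ymin + 1).toNat).map
        (fun _ => List.replicate (xmax - xmin + 1).toNat ".")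
    positions.foldl (fun g p =>
      g.set (p.2 - ymin).toNat (((g.getD (p.2 - ymin).toNat []).set (p.1 - xmin).toNat "#"))) grid
  | _, _, _, _ => []   -- unreachable inside Pre_ (positions ≠ []); Python raises ValueError on min([])

-- ===== PORT B =====
def min_grid_alt (positions : List (Int × Int)) : List (List String) :=
  let pts : PySem.Set (Int × Int) := PySem.Set.ofList positions
  match PySem.List.min? (positions.map (fun p => p.1)) (fun v => v) with
  | none => []   -- unreachable inside Pre_; Python raises ValueError on min of an empty generator
  | some xmin =>
  match PySem.List.max? (positions.map (fun p => p.1)) (fun v => v) with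
  | none => []
  | some xmax =>
  match PySem.List.min? (positions.map (fun p => p.2)) (fun v => v) with
  | none => []
  | some ymin =>
  match PySem.List.max? (positions.map (fun p => p.2)) (fun v => v) with
  | none => []
  | some ymax =>
    (PySem.List.pyRange ymin (ymax + 1) 1).map (fun y =>
      (PySem.List.pyRange xmin (xmax + 1) 1).map (fun x =>
        if PySem.Set.contains pts (x, y) then "#" else "."))

-- ===== PRECONDITION & SPEC =====
-- Pre_ excludes only the empty list, on which A (and B) raise ValueError (min of empty sequence).
def Pre_min_grid (positions : List (Int × Int)) : Prop := positions ≠ []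
instance (positions : List (Int × Int)) : Decidable (Pre_min_grid positions) := by unfold Pre_min_grid; infer_instance
def pvWitness_min_grid : (List (Int × Int)) := [(0, 0), (2, 1)]

def Spec_min_grid (positions : List (Int × Int)) (out : List (List String)) : Prop := out = min_grid_alt positions
instance (positions : List (Int × Int)) (out : List (List String)) : Decidable (Spec_min_grid positions out) := by unfold Spec_min_grid; infer_instance

-- ===== CLAIM (what is proved, stated in full; the proofs are below) =====
def Claim_equal_min_grid : Prop := ∀ (positions : List (Int × Int)), Dom_min_grid positions → Pre_min_grid positions → Spec_min_grid positions (min_grid positions)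

-- ===== LEMMAS AND PROOFS =====

-- the update A's loop performs on the grid (named for the proofs; the port writes it inline)
def pvUpd (xmin ymin : Int) (g : List (List String)) (p : Int × Int) : List (List String) :=
  g.set (p.2 - ymin).toNat ((g.getD (p.2 - ymin).toNat []).set (p.1 - xmin).toNat "#")

-- cell accessor used by the proofs
def pvCell (g : List (List String)) (r c : Nat) : String := (g.getD r []).getD c ""

lemma pvCell_eq_getElem (g : List (List String)) (r c : Nat) (h1 : r < g.length)
    (h2 : c < (g[r]'h1).length) : pvCell g r c = (g[r]'h1)[c]'h2 := by
  simp [pvCell, List.getD_eq_getElem?_getD, h1, h2]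

lemma pvUpd_shape (xmin ymin : Int) (W : Nat) (g : List (List String)) (p : Int × Int)
    (hrow : ∀ row ∈ g, row.length = W) (hj : (p.2 - ymin).toNat < g.length) :
    (pvUpd xmin ymin g p).length = g.length ∧ ∀ row ∈ pvUpd xmin ymin g p, row.length = W := by
  refine ⟨by simp [pvUpd], ?_⟩
  intro row hr
  rcases List.mem_or_eq_of_mem_set hr with h | h
  · exact hrow _ h
  · subst h
    rw [List.getD_eq_getElem g [] hj, List.length_set]
    exact hrow _ (List.getElem_mem hj)

lemma fold_shape (xmin ymin : Int) (W : Nat) :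
    ∀ (ps : List (Int × Int)) (g : List (List String)),
    (∀ row ∈ g, row.length = W) →
    (∀ p ∈ ps, (p.2 - ymin).toNat < g.length) →
    (ps.foldl (pvUpd xmin ymin) g).length = g.length ∧
      ∀ row ∈ ps.foldl (pvUpd xmin ymin) g, row.length = W := by
  intro ps
  induction ps with
  | nil => intro g h1 _; exact ⟨rfl, h1⟩
  | cons p t ih =>
    intro g h1 h2
    obtain ⟨hl, hr⟩ := pvUpd_shape xmin ymin W g p h1 (h2 p (List.mem_cons_self ..))
    obtain ⟨ihl, ihr⟩ := ih (pvUpd xmin ymin g p) hr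
      (fun q hq => hl ▸ h2 q (List.mem_cons_of_mem _ hq))
    exact ⟨by simp only [List.foldl_cons]; rw [ihl, hl], by simpa using ihr⟩

lemma pvCell_pvUpd (xmin ymin : Int) (W : Nat) (g : List (List String)) (p : Int × Int)
    (hrow : ∀ row ∈ g, row.length = W)
    (hp : xmin ≤ p.1 ∧ (p.1 - xmin).toNat < W ∧ ymin ≤ p.2 ∧ (p.2 - ymin).toNat < g.length)
    (r c : Nat) (hr : r < g.length) (hc : c < W) :
    pvCell (pvUpd xmin ymin g p) r c =
      if p = (xmin + (c : Int), ymin + (r : Int)) then "#" else pvCell g r c := by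
  obtain ⟨hx1, hx2, hy1, hy2⟩ := hp
  have hrowlen : (g.getD (p.2 - ymin).toNat []).length = W := by
    rw [List.getD_eq_getElem g [] hy2]; exact hrow _ (List.getElem_mem hy2)
  by_cases hyeq : (p.2 - ymin).toNat = r
  · by_cases hxeq : (p.1 - xmin).toNat = c
    · have : p = (xmin + (c : Int), ymin + (r : Int)) := by
        obtain ⟨a, b⟩ := p; simp only [Prod.mk.injEq]; constructor <;> omega
      rw [if_pos this]
      have hlen : ((g[r]?.getD ([] : List String)).length) = W := by
        rw [← List.getD_eq_getElem?_getD, ← hyeq]; exact hrowlen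
      have hclen : c < (g[r]?.getD ([] : List String)).length := hlen ▸ hc
      simp only [pvCell, pvUpd, List.getD_eq_getElem?_getD, List.getElem?_set, hyeq, hr, hxeq]
      simp [hclen]
    · have : ¬ p = (xmin + (c : Int), ymin + (r : Int)) := by
        obtain ⟨a, b⟩ := p; simp only [Prod.mk.injEq, not_and]; intro ha; omega
      rw [if_neg this]
      simp [pvCell, pvUpd, List.getD_eq_getElem?_getD, hyeq, hr, hxeq]
  · have : ¬ p = (xmin + (c : Int), ymin + (r : Int)) := by
      obtain ⟨a, b⟩ := p; simp only [Prod.mk.injEq, not_and]; intro _; omega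
    rw [if_neg this]
    simp [pvCell, pvUpd, List.getD_eq_getElem?_getD, hyeq]

lemma fold_cell (xmin ymin : Int) (W : Nat) :
    ∀ (ps : List (Int × Int)) (g : List (List String)),
    (∀ row ∈ g, row.length = W) →
    (∀ p ∈ ps, xmin ≤ p.1 ∧ (p.1 - xmin).toNat < W ∧ ymin ≤ p.2 ∧ (p.2 - ymin).toNat < g.length) →
    ∀ (r c : Nat), r < g.length → c < W →
    pvCell (ps.foldl (pvUpd xmin ymin) g) r c =
      if (xmin + (c : Int), ymin + (r : Int)) ∈ ps then "#" else pvCell g r c := by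
  intro ps
  induction ps with
  | nil => intro g _ _ r c _ _; simp
  | cons p t ih =>
    intro g h1 h2 r c hr hc
    obtain ⟨hl, hrow'⟩ := pvUpd_shape xmin ymin W g p h1 (h2 p (List.mem_cons_self ..)).2.2.2
    have h2' : ∀ q ∈ t, xmin ≤ q.1 ∧ (q.1 - xmin).toNat < W ∧ ymin ≤ q.2 ∧
        (q.2 - ymin).toNat < (pvUpd xmin ymin g p).length := by
      intro q hq; have := h2 q (List.mem_cons_of_mem _ hq); rw [hl]; exact this
    rw [List.foldl_cons, ih (pvUpd xmin ymin g p) hrow' h2' r c (hl ▸ hr) hc,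
      pvCell_pvUpd xmin ymin W g p h1 (h2 p (List.mem_cons_self ..)) r c hr hc]
    by_cases hmem : (xmin + (c : Int), ymin + (r : Int)) ∈ t
    · simp [hmem]
    · by_cases hpe : p = (xmin + (c : Int), ymin + (r : Int))
      · simp [hpe, hmem]
      · simp [hmem, hpe, Ne.symm hpe]

theorem min_grid_eq (positions : List (Int × Int)) (hne : positions ≠ []) :
    min_grid positions = min_grid_alt positions := by
  cases hx : PySem.List.min? (positions.map (fun p => p.1)) (fun v => v) with
  | none => exact absurd (by simpa using (PySem.List.min?_eq_none_iff _ _).1 hx) hne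
  | some xmin =>
  cases hX : PySem.List.max? (positions.map (fun p => p.1)) (fun v => v) with
  | none => exact absurd (by simpa using (PySem.List.max?_eq_none_iff _ _).1 hX) hne
  | some xmax =>
  cases hy : PySem.List.min? (positions.map (fun p => p.2)) (fun v => v) with
  | none => exact absurd (by simpa using (PySem.List.min?_eq_none_iff _ _).1 hy) hne
  | some ymin =>
  cases hY : PySem.List.max? (positions.map (fun p => p.2)) (fun v => v) with
  | none => exact absurd (by simpa using (PySem.List.max?_eq_none_iff _ _).1 hY) hne
  | some ymax =>
  have hxmin := PySem.List.min?_isMin hx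
  have hxmax := PySem.List.max?_isMax hX
  have hymin := PySem.List.min?_isMin hy
  have hymax := PySem.List.max?_isMax hY
  set W : Nat := (xmax - xmin + 1).toNat with hW
  set H : Nat := (ymax - ymin + 1).toNat with hH
  have hbound : ∀ p ∈ positions, xmin ≤ p.1 ∧ (p.1 - xmin).toNat < W ∧ ymin ≤ p.2 ∧
      (p.2 - ymin).toNat < H := by
    intro p hp
    have b1 := hxmin p.1 (List.mem_map_of_mem hp)
    have b2 := hxmax p.1 (List.mem_map_of_mem hp)
    have b3 := hymin p.2 (List.mem_map_of_mem hp)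
    have b4 := hymax p.2 (List.mem_map_of_mem hp)
    simp only at b1 b2 b3 b4
    refine ⟨b1, ?_, b3, ?_⟩ <;> omega
  set grid0 : List (List String) :=
    (List.range H).map (fun _ => List.replicate W ".") with hg0
  have hg0len : grid0.length = H := by simp [hg0]
  have hg0row : ∀ row ∈ grid0, row.length = W := by
    intro row hr
    rw [hg0, List.mem_map] at hr
    obtain ⟨a, -, h⟩ := hr
    simp [← h]
  have hg0cell : ∀ r c : Nat, r < H → c < W → pvCell grid0 r c = "." := by
    intro r c hr hc
    simp [pvCell, hg0, List.getD_eq_getElem?_getD, hr, hc]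
  obtain ⟨hAlen, hArow⟩ := fold_shape xmin ymin W positions grid0 hg0row
    (fun p hp => hg0len ▸ (hbound p hp).2.2.2)
  have hcell := fold_cell xmin ymin W positions grid0 hg0row
    (fun p hp => hg0len ▸ hbound p hp)
  simp only [min_grid, min_grid_alt, hx, hX, hy, hY]
  show positions.foldl (pvUpd xmin ymin) grid0 = _
  have hyl : ((ymax + 1) - ymin).toNat = H := by omega
  have hxl : ((xmax + 1) - xmin).toNat = W := by omega
  apply List.ext_getElem
  · simp [PySem.List.length_pyRange_one, hyl, hAlen, hg0len]
  · intro r h1 h2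
    have hrH : r < H := by rw [hAlen, hg0len] at h1; exact h1
    have hrowA : (positions.foldl (pvUpd xmin ymin) grid0)[r].length = W :=
      hArow _ (List.getElem_mem h1)
    have hr2 : r < (ymax + 1 - ymin).toNat := by omega
    apply List.ext_getElem
    · simpa [PySem.List.length_pyRange_one, hxl] using hrowA
    · intro c hc1 hc2
      have hcW : c < W := by rw [hrowA] at hc1; exact hc1
      rw [← pvCell_eq_getElem _ r c h1 hc1,
        hcell r c (hg0len ▸ hrH) hcW, hg0cell r c hrH hcW]
      have hc2' : c < (xmax + 1 - xmin).toNat := by omega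
      simp only [List.getElem_map, PySem.List.getElem_pyRange_one]
      by_cases hmem : (xmin + (c : Int), ymin + (r : Int)) ∈ positions
      · simp [hmem, PySem.Set.contains, PySem.Set.mem_ofList]
      · simp [hmem, PySem.Set.contains, PySem.Set.mem_ofList]

-- ===== VERDICT (by name: the statement is the Claim_ definition above) =====
theorem min_grid_spec : Claim_equal_min_grid := by
  intro positions _ hpre
  exact min_grid_eq positions hpre
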